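-- pv_equiv track=rewrite | github.com/mbakeranalecta/sam | samsparser.py | parse_block_attributes
-- ===== SOURCE A (Python) =====
-- def parse_block_attributes(attributes_string):
--     try:
--         attributes_list = attributes_string.split()
--     except AttributeError:
--         return None, None
--     ids = [x[1:] for x in attributes_list if x[0] == '#']
--     conditions = [x[1:] for x in attributes_list if x[0] == '?']
--     unexpected_attributes = [x for x in attributes_list if not(x[0] in '?#')]
--     if unexpected_attributes:
--         raise Exception("Unexpected insert attribute(s): {0}".format(unexpected_attributes))
--     return ids if ids else None, conditions if conditions else None
-- ===== SOURCE B (Python) =====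
-- def parse_block_attributes(attributes_string):
--     try:
--         tokens = attributes_string.split()
--     except AttributeError:
--         return None, None
--     groups = {'#': [], '?': []}
--     unexpected = []
--     for tok in tokens:
--         if tok[0] in groups:
--             groups[tok[0]].append(tok[1:])
--         else:
--             unexpected.append(tok)
--     if unexpected:
--         raise Exception("Unexpected insert attribute(s): {0}".format(unexpected))
--     return groups['#'] or None, groups['?'] or None
-- ===== Notes on version B (the rewrite author's own statement) =====
-- stated objective: simpler
-- what changed: Replaces A's three separate comprehension passes over the token list by a single pass that accumulates stripped tokens in a sigil-keyed dict (and unexpected tokens in a side list), then reads ids/conditions out of the dict.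
import Mathlib
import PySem

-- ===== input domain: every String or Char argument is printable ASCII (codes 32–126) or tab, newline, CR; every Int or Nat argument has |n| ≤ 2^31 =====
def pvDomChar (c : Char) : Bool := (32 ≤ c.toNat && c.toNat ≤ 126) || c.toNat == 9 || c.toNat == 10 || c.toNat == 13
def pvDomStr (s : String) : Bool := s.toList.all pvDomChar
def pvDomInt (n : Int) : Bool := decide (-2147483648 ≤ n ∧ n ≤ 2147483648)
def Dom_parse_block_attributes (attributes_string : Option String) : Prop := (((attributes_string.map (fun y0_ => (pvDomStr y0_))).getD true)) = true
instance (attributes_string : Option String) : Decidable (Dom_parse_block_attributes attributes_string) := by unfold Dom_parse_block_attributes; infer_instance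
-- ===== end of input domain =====

-- B replaces A's three comprehension passes over the token list by one pass that accumulates
-- stripped tokens in a sigil-keyed dict (plus a side list of unexpected tokens): simpler, one traversal.


-- ===== PORT A =====
-- x[0] of a token: split() tokens are never empty, so the default ' ' is never used (exact)
def pvHead (x : String) : Char := (PySem.Str.pyGet? x 0).getD ' '
-- x[1:]
def pvTail (x : String) : String := PySem.Str.slice x (some 1) none

def parse_block_attributes (attributes_string : Option String) : Option (List String) × Option (List String) :=
  match attributes_string with
  | none => (none, none)  -- attributes_string.split() raises AttributeError on None → return None, None
  | some s =>
    let attributes_list := PySem.Str.split₀ s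
    let ids := (attributes_list.filter (fun x => pvHead x == '#')).map pvTail
    let conditions := (attributes_list.filter (fun x => pvHead x == '?')).map pvTail
    let unexpected_attributes := attributes_list.filter (fun x => !(pvHead x == '?' || pvHead x == '#'))
    if unexpected_attributes ≠ [] then
      (none, none)  -- Python raises Exception here; these inputs are excluded by Pre_
    else
      ((if ids ≠ [] then some ids else none), (if conditions ≠ [] then some conditions else none))

-- ===== PORT B =====
-- one loop step: file the stripped token under its sigil in the dict, or record it as unexpected
def pvStep (st : PySem.Dict Char (List String) × List String) (tok : String) :
    PySem.Dict Char (List String) × List String :=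
  if st.1.contains (pvHead tok) then
    (st.1.modify (pvHead tok) [] (fun l => l ++ [pvTail tok]), st.2)
  else
    (st.1, st.2 ++ [tok])

def pvInit : PySem.Dict Char (List String) := PySem.Dict.mk [('#', []), ('?', [])]

def parse_block_attributes_alt (attributes_string : Option String) : Option (List String) × Option (List String) :=
  match attributes_string with
  | none => (none, none)  -- AttributeError guard
  | some s =>
    let tokens := PySem.Str.split₀ s
    let st := tokens.foldl pvStep (pvInit, [])
    if st.2 ≠ [] then
      (none, none)  -- Python raises Exception here; these inputs are excluded by Pre_
    else
      let ids := st.1.getD '#' []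
      let conditions := st.1.getD '?' []
      ((if ids ≠ [] then some ids else none), (if conditions ≠ [] then some conditions else none))

-- ===== PRECONDITION & SPEC =====
-- Pre_ excludes exactly the inputs where A raises Exception: some token starts with a
-- character other than '#' or '?'. (On None and on all-sigil strings A returns normally.)
def Pre_parse_block_attributes (attributes_string : Option String) : Prop :=
  ∀ t ∈ ((attributes_string.map PySem.Str.split₀).getD []), pvHead t = '#' ∨ pvHead t = '?'
instance (attributes_string : Option String) : Decidable (Pre_parse_block_attributes attributes_string) := by unfold Pre_parse_block_attributes; infer_instance

def pvWitness_parse_block_attributes : Option String := some "#a ?b #c"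

def Spec_parse_block_attributes (attributes_string : Option String) (out : Option (List String) × Option (List String)) : Prop := out = parse_block_attributes_alt attributes_string
instance (attributes_string : Option String) (out : Option (List String) × Option (List String)) : Decidable (Spec_parse_block_attributes attributes_string out) := by unfold Spec_parse_block_attributes; infer_instance

-- ===== CLAIM (what is proved, stated in full; the proofs are below) =====
def Claim_equal_parse_block_attributes : Prop := ∀ (attributes_string : Option String), Dom_parse_block_attributes attributes_string → Pre_parse_block_attributes attributes_string → Spec_parse_block_attributes attributes_string (parse_block_attributes attributes_string)

-- ===== LEMMAS AND PROOFS =====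

-- On tokens whose head is '#' or '?', B's guarded fold never touches the unexpected list and
-- reduces to the unguarded modify-fold, provided the dict contains both sigil keys.
theorem pvFold_eq (ts : List String) (d : PySem.Dict Char (List String)) (u : List String)
    (hall : ∀ t ∈ ts, pvHead t = '#' ∨ pvHead t = '?')
    (h1 : d.contains '#' = true) (h2 : d.contains '?' = true) :
    ts.foldl pvStep (d, u) =
      (ts.foldl (fun d t => d.modify (pvHead t) [] (fun l => l ++ [pvTail t])) d, u) := by
  induction ts generalizing d with
  | nil => rfl
  | cons t ts ih =>
    have ht : d.contains (pvHead t) = true := by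
      rcases hall t (List.mem_cons_self ..) with h | h <;> rw [h] <;> assumption
    simp only [List.foldl_cons, pvStep, ht]
    exact ih _ (fun x hx => hall x (List.mem_cons_of_mem _ hx))
      (by rw [PySem.Dict.contains_modify]; simp [h1])
      (by rw [PySem.Dict.contains_modify]; simp [h2])

-- the unguarded modify-fold over tokens, read at a sigil key, collects exactly the filtered stripped tokens
theorem pvFold_getD (ts : List String) (d : PySem.Dict Char (List String)) (c : Char) :
    (ts.foldl (fun d t => d.modify (pvHead t) [] (fun l => l ++ [pvTail t])) d).getD c [] =
      d.getD c [] ++ (ts.filter (fun t => pvHead t == c)).map pvTail := by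
  have h := PySem.Dict.getD_foldl_modify_append (ts.map (fun t => (pvHead t, pvTail t))) d c
  rw [List.foldl_map] at h
  rw [h, List.filter_map, List.map_map]
  rfl

-- ===== VERDICT (by name: the statement is the Claim_ definition above) =====
theorem parse_block_attributes_spec : Claim_equal_parse_block_attributes := by
  intro o _ hpre
  unfold Spec_parse_block_attributes
  cases o with
  | none => rfl
  | some s =>
    have hall : ∀ t ∈ PySem.Str.split₀ s, pvHead t = '#' ∨ pvHead t = '?' := fun t ht => hpre t ht
    have hunex : (PySem.Str.split₀ s).filter (fun x => !(pvHead x == '?' || pvHead x == '#')) = [] := by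
      rw [List.filter_eq_nil_iff]
      intro t ht
      rcases hall t ht with h | h <;> simp [h]
    simp only [parse_block_attributes, parse_block_attributes_alt,
      pvFold_eq (PySem.Str.split₀ s) pvInit [] hall (by decide) (by decide), hunex,
      pvFold_getD, ne_eq]
    have h1 : pvInit.getD '#' ([] : List String) = [] := rfl
    have h2 : pvInit.getD '?' ([] : List String) = [] := rfl
    simp [h1, h2]
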